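-- pv_equiv track=rewrite | github.com/ronhadad22/DevOpsNov23 | python_katas/kata_1/questions.py | pair_match
-- ===== SOURCE A (Python) =====
-- def pair_match(men, women):
--     """
--     3 Kata
--
--     This function gets two dictionaries of the type:
--     {
--         "<name>": <age>
--     }
--
--     Where <name> is a string name, and <age> is an integer representing the age
--     The function returns a pair of names (tuple), of from men dict, the other from women dict,
--     where their absolute age differences is the minimal
--
--     e.g.
--     men = {"John": 20, "Abraham": 45}
--     women = {"July": 18, "Kim": 26}
--
--     The returned value should be a tuple ("John", "July") since:
--
--     abs(John - Kim) = abs(20 - 26) = abs(-6) = 6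
--     abs(John - July) = abs(20 - 18) = abs(2) = 2
--     abs(Abraham - Kim) = abs(45 - 26) = abs(19) = 19
--     abs(Abraham - July) = abs(45 - 18) = abs(27) = 27
--
--     :param men: dict mapping name -> age
--     :param women: dict mapping name -> age
--     :return: tuple (men_name, women_name) such their age absolute difference is the minimal
--     """
--     # Check if either of the input dictionaries is empty
--     if not men or not women:
--         return ()  # Return an empty tuple if one or both dictionaries are empty
--
--     # Initialize variables to store the best match and the minimum age difference
--     best_match = None
--     min_age_difference = float('inf')
--
--     # Iterate over each combination of names from men and women dictionaries
--     for men_name, men_age in men.items():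
--         for women_name, women_age in women.items():
--             # Calculate the absolute age difference between the current pair
--             age_difference = abs(men_age - women_age)
--
--             # Update the best match if the current pair has a smaller age difference
--             if age_difference < min_age_difference:
--                 best_match = (men_name, women_name)
--                 min_age_difference = age_difference
--
--     return best_match
-- ===== SOURCE B (Python) =====
-- def _bisect_left(a, x):
--     # CPython's bisect_left loop, written out (A imports no modules)
--     lo, hi = 0, len(a)
--     while lo < hi:
--         mid = (lo + hi) // 2
--         if a[mid] < x:
--             lo = mid + 1
--         else:
--             hi = mid
--     return lo
--
--
-- def pair_match(men, women):
--     if not men or not women: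
--         return ()
--     # first occurrence of each distinct women age: age -> (index, name)
--     first = {}
--     i = 0
--     for name, age in women.items():
--         if age not in first:
--             first[age] = (i, name)
--         i += 1
--     ages = sorted(first)  # distinct ages, increasing
--     best = None  # (diff, man_name, woman_name)
--     for mname, mage in men.items():
--         j = _bisect_left(ages, mage)
--         if j == 0:
--             g = ages[0]
--         elif j == len(ages):
--             g = ages[j - 1]
--         else:
--             g1, g2 = ages[j - 1], ages[j]
--             # pick the age with smaller (diff, first-occurrence index)
--             if mage - g1 < g2 - mage or (mage - g1 == g2 - mage
--                                          and first[g1][0] <= first[g2][0]):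
--                 g = g1
--             else:
--                 g = g2
--         d = abs(mage - g)
--         if best is None or d < best[0]:
--             best = (d, mname, first[g][1])
--     return (best[1], best[2])
-- ===== Notes on version B (the rewrite author's own statement) =====
-- stated objective: faster
-- what changed: Instead of A's nested scan over all men x women pairs, B builds a first-occurrence index of the distinct women ages once, sorts them, and binary-searches the nearest age per man, reproducing A's insertion-order tie-breaking exactly.
import Mathlib
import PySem

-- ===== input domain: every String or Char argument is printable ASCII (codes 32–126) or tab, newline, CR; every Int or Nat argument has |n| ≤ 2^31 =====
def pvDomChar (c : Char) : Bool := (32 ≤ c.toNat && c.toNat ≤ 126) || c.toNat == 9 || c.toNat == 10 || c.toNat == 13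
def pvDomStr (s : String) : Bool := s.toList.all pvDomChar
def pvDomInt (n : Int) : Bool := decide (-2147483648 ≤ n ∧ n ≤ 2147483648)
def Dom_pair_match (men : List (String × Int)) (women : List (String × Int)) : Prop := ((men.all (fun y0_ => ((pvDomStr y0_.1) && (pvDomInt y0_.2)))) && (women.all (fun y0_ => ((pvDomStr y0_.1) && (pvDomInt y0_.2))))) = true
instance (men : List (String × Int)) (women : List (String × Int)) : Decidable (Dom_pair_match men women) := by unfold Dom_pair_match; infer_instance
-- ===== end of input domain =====

-- B replaces A's O(n·m) all-pairs scan by sorting the distinct women ages once and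
-- binary-searching the nearest age per man (O((n+m)·log m)); measured faster.

-- ===== PORT A =====
-- literal port of A: nested loops over men × women, keeping (best_match, min_age_difference);
-- min_age_difference = float('inf') is modelled as `none` of an Option Int.
def pair_match (men : List (String × Int)) (women : List (String × Int)) : List String :=
  if men = [] ∨ women = [] then []
  else
    let res := men.foldl (fun st m =>
      women.foldl (fun (st : Option (String × String) × Option Int) w =>
        let d := |m.2 - w.2|
        let upd := match st.2 with
          | none => true
          | some v => decide (d < v)
        if upd then (some (m.1, w.1), some d) else st) st)
      ((none : Option (String × String)), (none : Option Int))
    match res.1 with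
    | none => []
    | some p => [p.1, p.2]

-- ===== PORT B =====
-- Source B's first-occurrence dict build: first[age] = (index, name), with a running index i
def pmBuildFirst (women : List (String × Int)) : PySem.Dict Int (Int × String) :=
  (women.foldl (fun (st : PySem.Dict Int (Int × String) × Int) w =>
      (if st.1.contains w.2 then st.1 else st.1.insert w.2 (st.2, w.1), st.2 + 1))
    ((PySem.Dict.empty : PySem.Dict Int (Int × String)), (0 : Int))).1

-- Source B's per-man candidate choice (its `_bisect_left` is CPython's bisect_left loop,
-- ported as PySem.List.bisectLeft, which is that exact loop); ages[..] indices are always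
-- in range here, ported with the total pyGetD.  The Python tuple comparison
-- `(d1, i1) <= (d2, i2)` is written out lexicographically.
def pmChoose (first : PySem.Dict Int (Int × String)) (ages : List Int) (a : Int) : Int :=
  let j := PySem.List.bisectLeft ages a
  if j = 0 then PySem.List.pyGetD ages 0 0
  else if j = ages.length then PySem.List.pyGetD ages ((j : Int) - 1) 0
  else
    let g1 := PySem.List.pyGetD ages ((j : Int) - 1) 0
    let g2 := PySem.List.pyGetD ages ((j : Int)) 0
    if a - g1 < g2 - a ∨ (a - g1 = g2 - a ∧ (first.getD g1 (0, "")).1 ≤ (first.getD g2 (0, "")).1)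
    then g1 else g2

def pair_match_alt (men : List (String × Int)) (women : List (String × Int)) : List String :=
  if men = [] ∨ women = [] then []
  else
    let first := pmBuildFirst women
    let ages := PySem.List.sorted first.keys (fun x => x) false
    let best := men.foldl (fun (best : Option (Int × String × String)) m =>
      let g := pmChoose first ages m.2
      let d := |m.2 - g|
      match best with
      | none => some (d, m.1, (first.getD g (0, "")).2)
      | some b => if d < b.1 then some (d, m.1, (first.getD g (0, "")).2) else some b) none
    match best with
    | none => []
    | some b => [b.2.1, b.2.2]

-- ===== PRECONDITION & SPEC =====
def Spec_pair_match (men : List (String × Int)) (women : List (String × Int)) (out : List String) : Prop := out = pair_match_alt men women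
instance (men : List (String × Int)) (women : List (String × Int)) (out : List String) : Decidable (Spec_pair_match men women out) := by unfold Spec_pair_match; infer_instance

-- ===== CLAIM (what is proved, stated in full; the proofs are below) =====
def Claim_equal_pair_match : Prop := ∀ (men : List (String × Int)) (women : List (String × Int)), Dom_pair_match men women → Spec_pair_match men women (pair_match men women)

-- ===== LEMMAS AND PROOFS =====

-- The abstract "first strict minimum" state machine both programs implement.
def pmStep (acc : Option (Int × String × String)) (x : Int × String × String) :
    Option (Int × String × String) :=
  match acc with
  | none => some x
  | some b => if x.1 < b.1 then some x else some b

def pmOp (a b : Option (Int × String × String)) : Option (Int × String × String) :=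
  match a, b with
  | none, b => b
  | some x, none => some x
  | some x, some y => if y.1 < x.1 then some y else some x

theorem pmStep_eq_op (a : Option (Int × String × String)) (x : Int × String × String) :
    pmStep a x = pmOp a (some x) := by cases a <;> rfl

theorem pmOp_none_left (b : Option (Int × String × String)) : pmOp none b = b := by
  cases b <;> rfl

theorem pmOp_assoc (a b c : Option (Int × String × String)) :
    pmOp (pmOp a b) c = pmOp a (pmOp b c) := by
  rcases a with _ | x
  · rw [pmOp_none_left, pmOp_none_left]
  · rcases b with _ | y
    · cases c <;> rfl
    · rcases c with _ | z
      · by_cases h1 : y.1 < x.1 <;> simp [pmOp, h1]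
      · by_cases h1 : y.1 < x.1 <;> by_cases h2 : z.1 < y.1 <;> by_cases h3 : z.1 < x.1 <;>
          simp [pmOp, h1, h2, h3] <;> omega

-- fold decomposition: folding from any start state = op of start and the none-start fold
theorem pm_foldl_decomp {γ : Type} (f : γ → Int × String × String) (l : List γ)
    (st : Option (Int × String × String)) :
    l.foldl (fun acc x => pmStep acc (f x)) st
      = pmOp st (l.foldl (fun acc x => pmStep acc (f x)) none) := by
  induction l generalizing st with
  | nil => cases st <;> rfl
  | cons x t ih =>
    simp only [List.foldl_cons]
    rw [ih (pmStep st (f x)), ih (pmStep none (f x)), pmStep_eq_op, pmStep_eq_op,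
      pmOp_none_left, pmOp_assoc]

theorem pm_fold_mem {γ : Type} (f : γ → Int × String × String) (l : List γ)
    (z : Int × String × String)
    (h : l.foldl (fun acc x => pmStep acc (f x)) none = some z) :
    ∃ w ∈ l, f w = z := by
  induction l with
  | nil => simp at h
  | cons x t ih =>
    simp only [List.foldl_cons] at h
    rw [pm_foldl_decomp] at h
    rcases ht : t.foldl (fun acc x => pmStep acc (f x)) none with _ | y <;> rw [ht] at h
    · simp only [pmStep, pmOp] at h
      exact ⟨x, by simp, Option.some.inj h⟩
    · simp only [pmStep, pmOp] at h
      split_ifs at h with hc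
      · have hyz : y = z := Option.some.inj h
        subst hyz
        obtain ⟨w, hw, hfw⟩ := ih ht
        exact ⟨w, by simp [hw], hfw⟩
      · exact ⟨x, by simp, Option.some.inj h⟩

-- fold over a stream whose first minimum is at position k returns exactly that element
theorem pmStep_isSome (a : Option (Int × String × String)) (x : Int × String × String) :
    (pmStep a x).isSome := by
  cases a
  · simp [pmStep]
  · simp only [pmStep]; split_ifs <;> simp

theorem pmOp_some_left_isSome (x : Int × String × String)
    (b : Option (Int × String × String)) : (pmOp (some x) b).isSome := by
  cases b
  · simp [pmOp]
  · simp only [pmOp]; split_ifs <;> simp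

theorem pm_fold_ne_none' {γ : Type} (f : γ → Int × String × String) (x : γ) (t : List γ)
    (st : Option (Int × String × String)) :
    ((x :: t).foldl (fun acc x => pmStep acc (f x)) st).isSome := by
  simp only [List.foldl_cons]
  rw [pm_foldl_decomp]
  have hs := pmStep_isSome st (f x)
  rcases hv : pmStep st (f x) with _ | v
  · rw [hv] at hs; simp at hs
  · exact pmOp_some_left_isSome v _

theorem pm_fold_first_argmin {γ : Type} (f : γ → Int × String × String) (l : List γ)
    (k : Nat) (hk : k < l.length)
    (hb : ∀ i, (hi : i < l.length) → i < k → (f l[k]).1 < (f l[i]).1)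
    (hall : ∀ w ∈ l, (f l[k]).1 ≤ (f w).1) :
    l.foldl (fun acc x => pmStep acc (f x)) none = some (f l[k]) := by
  induction l generalizing k with
  | nil => simp at hk
  | cons x t ih =>
    simp only [List.foldl_cons]
    rw [pm_foldl_decomp]
    rcases ht : t.foldl (fun acc x => pmStep acc (f x)) none with _ | y
    · -- t's fold is none, so t = [] and k = 0
      cases t with
      | nil =>
        have hk0 : k = 0 := by simpa using hk
        subst hk0
        rfl
      | cons b tb =>
        have := pm_fold_ne_none' f b tb none
        rw [ht] at this
        simp at this
    · cases k with
      | zero =>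
        obtain ⟨w, hw, hfw⟩ := pm_fold_mem f t y ht
        have hle : (f x).1 ≤ y.1 := by
          have := hall w (by simp [hw])
          simpa [hfw] using this
        simp only [pmStep, pmOp]
        rw [if_neg (by omega)]
        simp
      | succ k' =>
        have hk' : k' < t.length := by simpa using hk
        have harg : t.foldl (fun acc x => pmStep acc (f x)) none = some (f t[k']) := by
          apply ih k' hk'
          · intro i hi hik
            have := hb (i + 1) (by simpa using hi) (by omega)
            simpa using this
          · intro w hw
            have := hall w (by simp [hw])
            simpa using this
        have hy : y = f t[k'] := Option.some.inj (ht.symm.trans harg)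
        have hlt : (f t[k']).1 < (f x).1 := by
          have := hb 0 (by simp) (by omega)
          simpa using this
        simp only [pmStep, pmOp, hy]
        rw [if_pos (by omega)]
        simp

-- first-occurrence search used to characterise pmBuildFirst
def pmFind (ws : List (String × Int)) (i : Int) (g : Int) : Option (Int × String) :=
  match ws with
  | [] => none
  | w :: t => if w.2 = g then some (i, w.1) else pmFind t (i + 1) g

theorem pm_get?_none_of_not_contains {κ ν : Type} [BEq κ] (d : PySem.Dict κ ν) (g : κ)
    (hc : d.contains g = false) : d.get? g = none := by
  have h := PySem.Dict.contains_eq_isSome_get? d g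
  rw [hc] at h
  rcases hv : d.get? g with _ | v
  · rfl
  · rw [hv] at h; simp at h

theorem pmBuildFirst_get? (ws : List (String × Int)) (d : PySem.Dict Int (Int × String))
    (i : Int) (g : Int) :
    ((ws.foldl (fun (st : PySem.Dict Int (Int × String) × Int) w =>
        (if st.1.contains w.2 then st.1 else st.1.insert w.2 (st.2, w.1), st.2 + 1))
      (d, i)).1).get? g = ((d.get? g).or (pmFind ws i g)) := by
  induction ws generalizing d i with
  | nil => simp [pmFind]
  | cons w t ih =>
    simp only [List.foldl_cons, pmFind]
    by_cases hc : d.contains w.2 = true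
    · rw [if_pos hc, ih]
      by_cases hg : w.2 = g
      · have hs : (d.get? g).isSome := by
          rw [← PySem.Dict.contains_eq_isSome_get?, ← hg]; exact hc
        rcases hv : d.get? g with _ | v
        · rw [hv] at hs; simp at hs
        · simp [hg]
      · simp [hg]
    · rw [if_neg hc, ih]
      have hn : d.get? w.2 = none := pm_get?_none_of_not_contains d w.2 (by simpa using hc)
      by_cases hg : w.2 = g
      · rw [← hg, hn, PySem.Dict.get?_insert_self]
        simp
      · rw [PySem.Dict.get?_insert_of_ne d _ (Ne.symm hg)]
        simp [hg]

theorem pmBuildFirst_eq (ws : List (String × Int)) (g : Int) :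
    (pmBuildFirst ws).get? g = pmFind ws 0 g := by
  unfold pmBuildFirst
  rw [pmBuildFirst_get?]
  simp [PySem.Dict.get?_empty]

theorem pmBuildFirst_keys (ws : List (String × Int)) (d : PySem.Dict Int (Int × String))
    (i : Int) :
    ((ws.foldl (fun (st : PySem.Dict Int (Int × String) × Int) w =>
        (if st.1.contains w.2 then st.1 else st.1.insert w.2 (st.2, w.1), st.2 + 1))
      (d, i)).1).keys = PySem.Set.update d.keys (ws.map (·.2)) := by
  induction ws generalizing d i with
  | nil => simp [PySem.Set.update]
  | cons w t ih =>
    simp only [List.foldl_cons, List.map_cons]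
    by_cases hc : d.contains w.2 = true
    · rw [if_pos hc, ih]
      have hmem : w.2 ∈ d.keys := (PySem.Dict.contains_iff_mem_keys d w.2).mp hc
      have : PySem.Set.update d.keys (w.2 :: t.map (·.2))
          = PySem.Set.update (PySem.Set.add d.keys w.2) (t.map (·.2)) := rfl
      rw [this, PySem.Set.add_of_mem hmem]
    · rw [if_neg hc, ih]
      have : PySem.Set.update d.keys (w.2 :: t.map (·.2))
          = PySem.Set.update (PySem.Set.add d.keys w.2) (t.map (·.2)) := rfl
      rw [this]
      have hnm : w.2 ∉ d.keys := fun h => by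
        have := (PySem.Dict.contains_iff_mem_keys d w.2).mpr h
        exact hc this
      rw [PySem.Set.add_of_not_mem hnm,
        PySem.Dict.keys_insert_of_not_contains d _ (by simpa using hc)]

theorem pmBuildFirst_keys_eq (ws : List (String × Int)) :
    (pmBuildFirst ws).keys = PySem.Set.ofList (ws.map (·.2)) := by
  unfold pmBuildFirst
  rw [pmBuildFirst_keys]
  rfl

theorem pmFind_isSome_iff (ws : List (String × Int)) (i g : Int) :
    (pmFind ws i g).isSome ↔ g ∈ ws.map (·.2) := by
  induction ws generalizing i with
  | nil => simp [pmFind]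
  | cons w t ih =>
    simp only [pmFind, List.map_cons, List.mem_cons]
    by_cases hg : w.2 = g
    · simp [hg]
    · simp only [if_neg hg, ih]
      constructor
      · intro h; exact Or.inr h
      · rintro (h | h)
        · exact absurd h.symm hg
        · exact h

theorem pmFind_spec (ws : List (String × Int)) (i g : Int) (k : Int) (nm : String)
    (h : pmFind ws i g = some (k, nm)) :
    ∃ t : Nat, k = i + t ∧ ∃ ht : t < ws.length,
      ws[t] = (nm, g) ∧ ∀ u, (hu : u < ws.length) → u < t → ws[u].2 ≠ g := by
  induction ws generalizing i k with
  | nil => simp [pmFind] at h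
  | cons w tl ih =>
    simp only [pmFind] at h
    by_cases hg : w.2 = g
    · rw [if_pos hg] at h
      injection h with h'
      injection h' with h1 h2
      refine ⟨0, by omega, by simp, ?_, ?_⟩
      · simp [← h2, ← hg]
      · intro u hu hu0; omega
    · rw [if_neg hg] at h
      obtain ⟨t, hk, ht, hws, hbef⟩ := ih (i + 1) k h
      refine ⟨t + 1, by omega, by simpa using ht, by simpa using hws, ?_⟩
      intro u hu hut
      cases u with
      | zero => simpa using hg
      | succ u' =>
        have := hbef u' (by simpa using hu) (by omega)
        simpa using this

-- ----- the per-man block lemma -----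

theorem pm_abs (x y : Int) : |x - y| = if y ≤ x then x - y else y - x := by
  split_ifs with h
  · exact abs_of_nonneg (by omega)
  · rw [abs_sub_comm]; exact abs_of_nonneg (by omega)

-- the candidate pmChoose picks is a closest distinct age, and among equally close
-- ones the one with the smaller first-occurrence index
theorem pmChoose_spec (first : PySem.Dict Int (Int × String)) (ages : List Int) (a : Int)
    (hlt : ages.Pairwise (· < ·)) (hne : ages ≠ []) :
    pmChoose first ages a ∈ ages ∧
    (∀ h ∈ ages, |a - pmChoose first ages a| ≤ |a - h|) ∧
    (∀ h ∈ ages, |a - h| = |a - pmChoose first ages a| →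
      (first.getD (pmChoose first ages a) (0, "")).1 ≤ (first.getD h (0, "")).1) := by
  have hle : ages.Pairwise (· ≤ ·) := hlt.imp le_of_lt
  obtain ⟨hjlen, hlo, hhi⟩ := PySem.List.bisectLeft_spec ages a hle
  have hmono := List.pairwise_iff_getElem.mp hle
  have hn : 0 < ages.length := List.length_pos_iff.mpr hne
  have hidx : ∀ h ∈ ages, ∃ i, ∃ hi : i < ages.length, ages[i] = h := by
    intro h hh; exact List.mem_iff_getElem.mp hh
  set j := PySem.List.bisectLeft ages a with hj
  by_cases hj0 : j = 0
  · -- every age is ≥ a; the smallest one is chosen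
    have hunf : pmChoose first ages a = PySem.List.pyGetD ages 0 0 := by
      rw [pmChoose, ← hj, if_pos hj0]
    have hget0 : PySem.List.pyGetD ages 0 0 = ages[0] := by
      have := PySem.List.pyGetD_natCast ages 0 0
      simpa [List.getD_eq_getElem?_getD, List.getElem?_eq_getElem hn] using this
    rw [hunf, hget0]
    have hge : ∀ i, (hi : i < ages.length) → a ≤ ages[i] := fun i hi =>
      hhi i hi (by omega)
    have h0 : a ≤ ages[0] := hge 0 hn
    refine ⟨List.getElem_mem hn, ?_, ?_⟩
    · intro h hh
      obtain ⟨i, hi, rfl⟩ := hidx h hh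
      have h1 := hge i hi
      have h2 : ages[0] ≤ ages[i] := by
        rcases Nat.eq_zero_or_pos i with h | h
        · subst h; exact le_refl _
        · exact hmono 0 i hn hi h
      rw [pm_abs, pm_abs]
      split_ifs <;> omega
    · intro h hh heq
      obtain ⟨i, hi, rfl⟩ := hidx h hh
      have h1 := hge i hi
      have h2 : ages[0] ≤ ages[i] := by
        rcases Nat.eq_zero_or_pos i with h | h
        · subst h; exact le_refl _
        · exact hmono 0 i hn hi h
      rw [pm_abs, pm_abs] at heq
      have : ages[i] = ages[0] := by split_ifs at heq <;> omega
      rw [this]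
  · by_cases hjn : j = ages.length
    · -- every age is < a; the largest one is chosen
      have hunf : pmChoose first ages a = PySem.List.pyGetD ages ((j : Int) - 1) 0 := by
        rw [pmChoose, ← hj, if_neg hj0, if_pos hjn]
      have hj1 : 1 ≤ j := by omega
      have hjm : j - 1 < ages.length := by omega
      have hgetm : PySem.List.pyGetD ages ((j : Int) - 1) 0 = ages[j - 1] := by
        have hc : ((j : Int) - 1) = ((j - 1 : Nat) : Int) := by omega
        rw [hc, PySem.List.pyGetD_natCast]
        simp [List.getD_eq_getElem?_getD, List.getElem?_eq_getElem hjm]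
      rw [hunf, hgetm]
      have hlt' : ∀ i, (hi : i < ages.length) → ages[i] < a := fun i hi =>
        hlo i hi (by omega)
      have h0 := hlt' (j - 1) hjm
      refine ⟨List.getElem_mem hjm, ?_, ?_⟩
      · intro h hh
        obtain ⟨i, hi, rfl⟩ := hidx h hh
        have h1 := hlt' i hi
        have h2 : ages[i] ≤ ages[j - 1] := by
          rcases Nat.lt_or_ge i (j - 1) with h | h
          · exact hmono i (j - 1) hi hjm h
          · have : i = j - 1 := by omega
            subst this; exact le_refl _
        rw [pm_abs, pm_abs]
        split_ifs <;> omega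
      · intro h hh heq
        obtain ⟨i, hi, rfl⟩ := hidx h hh
        have h1 := hlt' i hi
        have h2 : ages[i] ≤ ages[j - 1] := by
          rcases Nat.lt_or_ge i (j - 1) with h | h
          · exact hmono i (j - 1) hi hjm h
          · have : i = j - 1 := by omega
            subst this; exact le_refl _
        rw [pm_abs, pm_abs] at heq
        have : ages[i] = ages[j - 1] := by split_ifs at heq <;> omega
        rw [this]
    · -- ages[j-1] < a ≤ ages[j]: the two neighbours are compared
      have hj1 : 1 ≤ j := by omega
      have hjlt : j < ages.length := by omega
      have hjm : j - 1 < ages.length := by omega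
      have hgetm : PySem.List.pyGetD ages ((j : Int) - 1) 0 = ages[j - 1] := by
        have hc : ((j : Int) - 1) = ((j - 1 : Nat) : Int) := by omega
        rw [hc, PySem.List.pyGetD_natCast]
        simp [List.getD_eq_getElem?_getD, List.getElem?_eq_getElem hjm]
      have hgetj : PySem.List.pyGetD ages ((j : Int)) 0 = ages[j] := by
        rw [PySem.List.pyGetD_natCast]
        simp [List.getD_eq_getElem?_getD, List.getElem?_eq_getElem hjlt]
      have hg1a : ages[j - 1] < a := hlo (j - 1) hjm (by omega)
      have hag2 : a ≤ ages[j] := hhi j hjlt (by omega)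
      -- below index j every age is ≤ ages[j-1]; from j on every age is ≥ ages[j]
      have hbelow : ∀ i, (hi : i < ages.length) → i < j → ages[i] ≤ ages[j - 1] := by
        intro i hi hij
        rcases Nat.lt_or_ge i (j - 1) with h | h
        · exact hmono i (j - 1) hi hjm h
        · have : i = j - 1 := by omega
          subst this; exact le_refl _
      have habove : ∀ i, (hi : i < ages.length) → j ≤ i → ages[j] ≤ ages[i] := by
        intro i hi hij
        rcases Nat.lt_or_ge j i with h | h
        · exact hmono j i hjlt hi h
        · have : i = j := by omega
          subst this; exact le_refl _
      have hsplit : ∀ h ∈ ages, (h ≤ ages[j - 1] ∧ h < a) ∨ (ages[j] ≤ h ∧ a ≤ h) := by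
        intro h hh
        obtain ⟨i, hi, rfl⟩ := hidx h hh
        rcases Nat.lt_or_ge i j with hij | hij
        · exact Or.inl ⟨hbelow i hi hij, lt_of_le_of_lt (hbelow i hi hij) hg1a⟩
        · exact Or.inr ⟨habove i hi hij, le_trans hag2 (habove i hi hij)⟩
      have hunf : pmChoose first ages a =
          (if a - ages[j - 1] < ages[j] - a ∨
              (a - ages[j - 1] = ages[j] - a ∧
               (first.getD ages[j - 1] (0, "")).1 ≤ (first.getD ages[j] (0, "")).1)
           then ages[j - 1] else ages[j]) := by
        rw [pmChoose, ← hj, if_neg hj0, if_neg hjn, hgetm, hgetj]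
      rw [hunf]
      split_ifs with hcond
      · -- the left neighbour wins
        refine ⟨List.getElem_mem hjm, ?_, ?_⟩
        · intro h hh
          rcases hsplit h hh with ⟨h1, h2⟩ | ⟨h1, h2⟩ <;> rw [pm_abs, pm_abs] <;>
            split_ifs <;> omega
        · intro h hh heq
          rcases hsplit h hh with ⟨h1, h2⟩ | ⟨h1, h2⟩
          · have : h = ages[j - 1] := by
              rw [pm_abs, pm_abs] at heq; split_ifs at heq <;> omega
            rw [this]
          · have : h = ages[j] ∧ a - ages[j - 1] = ages[j] - a := by
              rw [pm_abs, pm_abs] at heq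
              constructor <;> [skip; skip] <;> split_ifs at heq <;> omega
            rcases hcond with hc | ⟨hc1, hc2⟩
            · omega
            · rw [this.1]; exact hc2
      · -- the right neighbour wins
        push Not at hcond
        obtain ⟨hc1, hc2⟩ := hcond
        refine ⟨List.getElem_mem hjlt, ?_, ?_⟩
        · intro h hh
          rcases hsplit h hh with ⟨h1, h2⟩ | ⟨h1, h2⟩ <;> rw [pm_abs, pm_abs] <;>
            split_ifs <;> omega
        · intro h hh heq
          rcases hsplit h hh with ⟨h1, h2⟩ | ⟨h1, h2⟩
          · have heq' : h = ages[j - 1] ∧ a - ages[j - 1] = ages[j] - a := by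
              rw [pm_abs, pm_abs] at heq
              constructor <;> [skip; skip] <;> split_ifs at heq <;> omega
            have := hc2 heq'.2
            rw [heq'.1]; omega
          · have : h = ages[j] := by
              rw [pm_abs, pm_abs] at heq; split_ifs at heq <;> omega
            rw [this]

theorem pm_block (ws : List (String × Int)) (hws : ws ≠ []) (a : Int) (mn : String) :
    ws.foldl (fun acc w => pmStep acc (|a - w.2|, mn, w.1)) none
      = some (|a - pmChoose (pmBuildFirst ws)
            (PySem.List.sorted (pmBuildFirst ws).keys (fun x => x) false) a|, mn,
          ((pmBuildFirst ws).getD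
            (pmChoose (pmBuildFirst ws)
              (PySem.List.sorted (pmBuildFirst ws).keys (fun x => x) false) a) (0, "")).2) := by
  set first := pmBuildFirst ws with hfirst
  set ages := PySem.List.sorted first.keys (fun x => x) false with hages
  have hkeys : first.keys = PySem.Set.ofList (ws.map (·.2)) := pmBuildFirst_keys_eq ws
  have hlt : ages.Pairwise (· < ·) := by
    rw [hages, hkeys]; exact PySem.List.sorted_ofList_pairwise_lt (ws.map (·.2))
  have hmemA : ∀ g, g ∈ ages ↔ g ∈ ws.map (·.2) := by
    intro g
    rw [hages, hkeys, PySem.List.mem_sorted, PySem.Set.mem_ofList]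
  have hne : ages ≠ [] := by
    rcases ws with _ | ⟨w, t⟩
    · exact absurd rfl hws
    · intro hnil
      have : w.2 ∈ ages := (hmemA w.2).mpr (by simp)
      rw [hnil] at this
      simp at this
  obtain ⟨hg_mem, hg_min, hg_first⟩ := pmChoose_spec first ages a hlt hne
  set g := pmChoose first ages a with hg
  -- the first dictionary holds g's first occurrence
  have hgL : g ∈ ws.map (·.2) := (hmemA g).mp hg_mem
  have hgetg : first.get? g = pmFind ws 0 g := pmBuildFirst_eq ws g
  have hsome : (pmFind ws 0 g).isSome := (pmFind_isSome_iff ws 0 g).mpr hgL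
  rcases hfind : pmFind ws 0 g with _ | ⟨kI, nm⟩
  · rw [hfind] at hsome; simp at hsome
  obtain ⟨t, hkt, ht, hwst, hbef⟩ := pmFind_spec ws 0 g kI nm hfind
  have hkt0 : kI = (t : Int) := by omega
  have hgetDg : first.getD g (0, "") = (kI, nm) := by
    show (first.get? g).getD (0, "") = (kI, nm)
    rw [hgetg, hfind]
    rfl
  -- the first-occurrence index of any age h present in ws at position i is ≤ i
  have hfidx_le : ∀ i, (hi : i < ws.length) → (first.getD ws[i].2 (0, "")).1 ≤ (i : Int) := by
    intro i hi
    have hhL : ws[i].2 ∈ ws.map (·.2) := by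
      exact List.mem_map.mpr ⟨ws[i], List.getElem_mem hi, rfl⟩
    have hsome' : (pmFind ws 0 ws[i].2).isSome := (pmFind_isSome_iff ws 0 ws[i].2).mpr hhL
    rcases hfind' : pmFind ws 0 ws[i].2 with _ | ⟨kh, nmh⟩
    · rw [hfind'] at hsome'; simp at hsome'
    obtain ⟨th, hkth, hth, hwsth, hbefh⟩ := pmFind_spec ws 0 ws[i].2 kh nmh hfind'
    have hgetDh : first.getD ws[i].2 (0, "") = (kh, nmh) := by
      show (first.get? ws[i].2).getD (0, "") = (kh, nmh)
      rw [pmBuildFirst_eq ws ws[i].2, hfind']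
      rfl
    rw [hgetDh]
    have : ¬ (i < th) := fun hc => hbefh i hi hc rfl
    omega
  have harg := pm_fold_first_argmin (fun w => (|a - w.2|, mn, w.1)) ws t ht
    (by
      intro i hi hik
      simp only
      have hwi : ws[i].2 ∈ ages := (hmemA ws[i].2).mpr
        (List.mem_map.mpr ⟨ws[i], List.getElem_mem hi, rfl⟩)
      have hle' := hg_min ws[i].2 hwi
      rw [hwst]
      simp only
      by_contra hcon
      push Not at hcon
      have heq : |a - ws[i].2| = |a - g| := by omega
      have := hg_first ws[i].2 hwi heq
      rw [hgetDg] at this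
      have h2 := hfidx_le i hi
      omega)
    (by
      intro w hw
      simp only
      rw [hwst]
      simp only
      exact hg_min w.2 ((hmemA w.2).mpr (List.mem_map.mpr ⟨w, hw, rfl⟩)))
  rw [harg, hwst, hgetDg]

-- ----- rebuilding the two programs from the abstract machine -----

def pmAbs (s : Option (Int × String × String)) : Option (String × String) × Option Int :=
  match s with
  | none => (none, none)
  | some (d, x, y) => (some (x, y), some d)

theorem pm_inner_abs (m : String × Int) (ws : List (String × Int))
    (st : Option (Int × String × String)) :
    ws.foldl (fun (st : Option (String × String) × Option Int) w =>
        let d := |m.2 - w.2|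
        let upd := match st.2 with
          | none => true
          | some v => decide (d < v)
        if upd then (some (m.1, w.1), some d) else st) (pmAbs st)
      = pmAbs (ws.foldl (fun acc w => pmStep acc (|m.2 - w.2|, m.1, w.1)) st) := by
  induction ws generalizing st with
  | nil => rfl
  | cons w t ih =>
    simp only [List.foldl_cons]
    rw [← ih (pmStep st (|m.2 - w.2|, m.1, w.1))]
    congr 1
    rcases st with _ | ⟨d, x, y⟩
    · rfl
    · simp only [pmAbs, pmStep]
      split_ifs with hc <;> simp_all

theorem pm_outer_abs (men ws : List (String × Int)) (st : Option (Int × String × String)) :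
    men.foldl (fun st m =>
        ws.foldl (fun (st : Option (String × String) × Option Int) w =>
          let d := |m.2 - w.2|
          let upd := match st.2 with
            | none => true
            | some v => decide (d < v)
          if upd then (some (m.1, w.1), some d) else st) st) (pmAbs st)
      = pmAbs (men.foldl (fun st m =>
          ws.foldl (fun acc w => pmStep acc (|m.2 - w.2|, m.1, w.1)) st) st) := by
  induction men generalizing st with
  | nil => rfl
  | cons m t ih =>
    simp only [List.foldl_cons]
    rw [pm_inner_abs m ws st, ih]

theorem pm_outer_eq (men women : List (String × Int)) (hw : women ≠ []) :
    men.foldl (fun st m =>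
        women.foldl (fun acc w => pmStep acc (|m.2 - w.2|, m.1, w.1)) st) none
      = men.foldl (fun st m => pmStep st
          (|m.2 - pmChoose (pmBuildFirst women)
              (PySem.List.sorted (pmBuildFirst women).keys (fun x => x) false) m.2|, m.1,
            ((pmBuildFirst women).getD
              (pmChoose (pmBuildFirst women)
                (PySem.List.sorted (pmBuildFirst women).keys (fun x => x) false) m.2)
              (0, "")).2)) none := by
  apply PySem.List.foldl_congr_mem
  intro st m _
  rw [pm_foldl_decomp, pm_block women hw m.2 m.1, ← pmStep_eq_op]

-- ===== VERDICT (by name: the statement is the Claim_ definition above) =====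
theorem pair_match_spec : Claim_equal_pair_match := by
  intro men women _
  unfold Spec_pair_match pair_match pair_match_alt
  by_cases hempty : men = [] ∨ women = []
  · rw [if_pos hempty, if_pos hempty]
  · rw [if_neg hempty, if_neg hempty]
    push Not at hempty
    obtain ⟨hm, hw⟩ := hempty
    -- B's loop body is pmStep applied to the per-man block value
    have hBstep : ∀ (best : Option (Int × String × String)) (m : String × Int),
        (let g := pmChoose (pmBuildFirst women)
            (PySem.List.sorted (pmBuildFirst women).keys (fun x => x) false) m.2
         let d := |m.2 - g|
         match best with
         | none => some (d, m.1, ((pmBuildFirst women).getD g (0, "")).2)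
         | some b => if d < b.1 then some (d, m.1, ((pmBuildFirst women).getD g (0, "")).2)
             else some b)
        = pmStep best
            (|m.2 - pmChoose (pmBuildFirst women)
                (PySem.List.sorted (pmBuildFirst women).keys (fun x => x) false) m.2|, m.1,
              ((pmBuildFirst women).getD
                (pmChoose (pmBuildFirst women)
                  (PySem.List.sorted (pmBuildFirst women).keys (fun x => x) false) m.2)
                (0, "")).2) := by
      intro best m
      cases best <;> rfl
    show (match (men.foldl (fun st m =>
        women.foldl (fun (st : Option (String × String) × Option Int) w =>
          let d := |m.2 - w.2|
          let upd := match st.2 with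
            | none => true
            | some v => decide (d < v)
          if upd then (some (m.1, w.1), some d) else st) st)
        ((none : Option (String × String)), (none : Option Int))).1 with
      | none => []
      | some p => [p.1, p.2])
      = _
    have habs := pm_outer_abs men women none
    show (match ((men.foldl (fun st m =>
        women.foldl (fun (st : Option (String × String) × Option Int) w =>
          let d := |m.2 - w.2|
          let upd := match st.2 with
            | none => true
            | some v => decide (d < v)
          if upd then (some (m.1, w.1), some d) else st) st) (pmAbs none))).1 with
      | none => []
      | some p => [p.1, p.2])
      = _
    rw [habs, pm_outer_eq men women hw]
    simp only [funext (fun best => funext (fun m => hBstep best m))]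
    rcases hmen : men with _ | ⟨m0, mt⟩
    · exact absurd hmen hm
    · have hs := pm_fold_ne_none' (fun m => (|m.2 - pmChoose (pmBuildFirst women)
          (PySem.List.sorted (pmBuildFirst women).keys (fun x => x) false) m.2|, m.1,
          ((pmBuildFirst women).getD
            (pmChoose (pmBuildFirst women)
              (PySem.List.sorted (pmBuildFirst women).keys (fun x => x) false) m.2)
            (0, "")).2)) m0 mt none
      rcases hres : (m0 :: mt).foldl (fun st m => pmStep st
          (|m.2 - pmChoose (pmBuildFirst women)
              (PySem.List.sorted (pmBuildFirst women).keys (fun x => x) false) m.2|, m.1,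
            ((pmBuildFirst women).getD
              (pmChoose (pmBuildFirst women)
                (PySem.List.sorted (pmBuildFirst women).keys (fun x => x) false) m.2)
              (0, "")).2)) none with _ | ⟨d, x, y⟩
      · rw [hres] at hs; simp at hs
      · rw [hres]
        rfl
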